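-- pv_equiv track=rewrite | github.com/SimonOuellette35/ARC-AGI_TaskDB_Tools | dreaming/dreaming_data_generator.py | _ends_with_crop
-- ===== SOURCE A (Python) =====
-- def _ends_with_crop(prog_instrs):
--     """Check if a program ends with a crop instruction.
--
--     Args:
--         prog_instrs: List of instruction strings
--
--     Returns:
--         True if the program has a crop instruction followed only by del statements (or nothing), False otherwise
--     """
--     if not prog_instrs:
--         return False
--
--     # Iterate backwards from the end, skipping del statements
--     for i in range(len(prog_instrs) - 1, -1, -1):
--         instr = prog_instrs[i]
--         if instr.startswith('del('):
--             # Skip del statements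
--             continue
--         # Found a non-del instruction - check if it's a crop
--         if instr.startswith('crop('):
--             return True
--
--         if instr.startswith('index('):  # TODO: this is not always technically correct, the index might not refer to a list of
--                                         # objects and instead it might be a rebuild_grid task?
--             return True
--
--         if instr.startswith('rebuild_grid('):
--             return False
--
--     # All instructions were del statements (shouldn't happen, but handle it)
--     return False
-- ===== SOURCE B (Python) =====
-- def _ends_with_crop(prog_instrs):
--     # Pass 1: keep only the instructions that can decide the answer.
--     relevant = [ins for ins in prog_instrs
--                 if ins.startswith('crop(') or ins.startswith('index(')
--                 or ins.startswith('rebuild_grid(')]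
--     if not relevant:
--         return False
--     # Pass 2: only the last relevant instruction matters.
--     last = relevant[-1]
--     return last.startswith('crop(') or last.startswith('index(')
-- ===== Notes on version B (the rewrite author's own statement) =====
-- stated objective: simpler
-- what changed: Replaces the backward index loop with four early-exit branches by a forward filter of the three decisive prefixes followed by a single check of the last filtered element.
import Mathlib
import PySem

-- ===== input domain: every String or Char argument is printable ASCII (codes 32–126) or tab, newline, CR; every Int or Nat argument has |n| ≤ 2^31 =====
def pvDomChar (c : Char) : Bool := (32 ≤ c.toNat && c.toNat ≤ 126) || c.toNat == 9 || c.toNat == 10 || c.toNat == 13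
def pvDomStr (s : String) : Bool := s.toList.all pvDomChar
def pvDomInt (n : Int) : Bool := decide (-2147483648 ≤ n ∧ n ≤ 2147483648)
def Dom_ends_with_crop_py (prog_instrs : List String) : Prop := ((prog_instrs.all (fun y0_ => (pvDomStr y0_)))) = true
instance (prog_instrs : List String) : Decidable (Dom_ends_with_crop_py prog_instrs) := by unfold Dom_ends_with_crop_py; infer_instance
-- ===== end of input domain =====

-- B replaces A's backward early-exit scan by a forward filter of the decisive prefixes plus one check of its last element (objective: simpler).

-- ===== PORT A =====
-- Python's `for i in range(len(prog_instrs)-1, -1, -1): instr = prog_instrs[i]` visits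
-- exactly the elements of the list in reverse order (every index is in range), so the
-- loop is transliterated as structural recursion over `prog_instrs.reverse`; this is exact.
def pvEwcLoop : List String → Bool
  | [] => false                                     -- loop finished: `return False`
  | instr :: rest =>
    if PySem.Str.startswith instr "del(" then pvEwcLoop rest           -- continue
    else if PySem.Str.startswith instr "crop(" then true
    else if PySem.Str.startswith instr "index(" then true
    else if PySem.Str.startswith instr "rebuild_grid(" then false
    else pvEwcLoop rest                                                -- no branch fired: next i

def ends_with_crop_py (prog_instrs : List String) : Bool :=
  if prog_instrs = [] then false
  else pvEwcLoop prog_instrs.reverse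

-- ===== PORT B =====
def pvRelevant (s : String) : Bool :=
  PySem.Str.startswith s "crop(" || PySem.Str.startswith s "index(" ||
    PySem.Str.startswith s "rebuild_grid("

def ends_with_crop_py_alt (prog_instrs : List String) : Bool :=
  let relevant := prog_instrs.filter pvRelevant
  match relevant.getLast? with
  | none => false
  | some last => PySem.Str.startswith last "crop(" || PySem.Str.startswith last "index("

-- ===== PRECONDITION & SPEC =====
def Spec_ends_with_crop_py (prog_instrs : List String) (out : Bool) : Prop := out = ends_with_crop_py_alt prog_instrs
instance (prog_instrs : List String) (out : Bool) : Decidable (Spec_ends_with_crop_py prog_instrs out) := by unfold Spec_ends_with_crop_py; infer_instance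

-- ===== CLAIM (what is proved, stated in full; the proofs are below) =====
def Claim_equal_ends_with_crop_py : Prop := ∀ (prog_instrs : List String), Dom_ends_with_crop_py prog_instrs → Spec_ends_with_crop_py prog_instrs (ends_with_crop_py prog_instrs)

-- ===== LEMMAS AND PROOFS =====

-- A string starting with "del(" starts with none of the three decisive prefixes.
theorem pv_del_not_relevant (s : String)
    (h : PySem.Chars.startswith s.toList ['d', 'e', 'l', '('] = true) :
    pvRelevant s = false := by
  have hp : ['d', 'e', 'l', '('] <+: s.toList := (PySem.Chars.startswith_iff _ _).mp h
  simp only [pvRelevant, PySem.Str.startswith_eq, Bool.or_eq_false_iff]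
  refine ⟨⟨?_, ?_⟩, ?_⟩ <;>
  · rw [← Bool.not_eq_true, PySem.Chars.startswith_iff]
    intro hq
    rcases List.prefix_or_prefix_of_prefix hp hq with h' | h' <;> revert h' <;> decide

-- The backward scan over r equals checking the first relevant element of r.
theorem pv_loop_eq (r : List String) :
    pvEwcLoop r =
      (match (r.filter pvRelevant).head? with
        | none => false
        | some x => PySem.Str.startswith x "crop(" || PySem.Str.startswith x "index(") := by
  induction r with
  | nil => rfl
  | cons x rest ih =>
    cases hd : PySem.Chars.startswith x.toList ['d', 'e', 'l', '('] with
    | true =>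
      have hrel := pv_del_not_relevant x hd
      simp [pvEwcLoop, hd, hrel, ih]
    | false =>
      cases hc : PySem.Chars.startswith x.toList ['c', 'r', 'o', 'p', '('] with
      | true => simp [pvEwcLoop, hd, hc, pvRelevant]
      | false =>
        cases hi : PySem.Chars.startswith x.toList ['i', 'n', 'd', 'e', 'x', '('] with
        | true => simp [pvEwcLoop, hd, hc, hi, pvRelevant]
        | false =>
          cases hr : PySem.Chars.startswith x.toList
              ['r', 'e', 'b', 'u', 'i', 'l', 'd', '_', 'g', 'r', 'i', 'd', '('] with
          | true => simp [pvEwcLoop, hd, hc, hi, hr, pvRelevant]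
          | false =>
            have hrel : pvRelevant x = false := by simp [pvRelevant, hc, hi, hr]
            simp [pvEwcLoop, hd, hc, hi, hr, hrel, ih]

-- ===== VERDICT (by name: the statement is the Claim_ definition above) =====
theorem ends_with_crop_py_spec : Claim_equal_ends_with_crop_py := by
  intro l _
  show ends_with_crop_py l = ends_with_crop_py_alt l
  unfold ends_with_crop_py ends_with_crop_py_alt
  by_cases hnil : l = []
  · subst hnil; rfl
  · simp only [hnil, ite_false]
    rw [pv_loop_eq, List.filter_reverse, List.head?_reverse]
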